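-- pv_equiv track=rewrite | github.com/dbp109/Battleships | battleships.py | check_if_hits
-- ===== SOURCE A (Python) =====
-- def check_if_hits(row, column, fleet):
--     '''returns Boolean value, which is True if the shot of the human player at the square
--     represented by row and column hits any of the ships of fleet, and False otherwise'''
--     for ship in fleet:
--         if (row, column) in ship[4]:
--             return False
--         if ship[2]:
--             for i in range(ship[3]):
--                 new_row = ship[0]
--                 new_column = ship[1] + i
--                 if row == new_row and column == new_column:
--                     return True
--         if not ship[2]:
--             for i in range(ship[3]):
--                 new_row = ship[0] + i
--                 new_column = ship[1]
--                 if row == new_row and column == new_column: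
--                     return True
--     return False
-- ===== SOURCE B (Python) =====
-- def _ship_verdict(row, column, ship):
--     '''per-ship three-valued verdict: False = already-hit square, True = fresh hit,
--     None = this ship says nothing about the shot'''
--     r0, c0, horiz, length, hits = ship
--     if (row, column) in hits:
--         return False
--     fixed, fixed0, moving, moving0 = (row, r0, column, c0) if horiz else (column, c0, row, r0)
--     if fixed == fixed0 and moving0 <= moving < moving0 + length:
--         return True
--     return None
--
-- def check_if_hits(row, column, fleet):
--     '''returns Boolean value, which is True if the shot of the human player at the square
--     represented by row and column hits any of the ships of fleet, and False otherwise'''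
--     return next((v for ship in fleet
--                    for v in [_ship_verdict(row, column, ship)]
--                    if v is not None), False)
-- ===== Notes on version B (the rewrite author's own statement) =====
-- stated objective: faster
-- what changed: Replaced per-cell iteration with a per-ship three-valued verdict helper (orientation folded into one closed-form arithmetic range check by swapping the fixed/moving axes), with the fleet scanned by first-some search instead of an explicit loop with early returns.
import Mathlib
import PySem

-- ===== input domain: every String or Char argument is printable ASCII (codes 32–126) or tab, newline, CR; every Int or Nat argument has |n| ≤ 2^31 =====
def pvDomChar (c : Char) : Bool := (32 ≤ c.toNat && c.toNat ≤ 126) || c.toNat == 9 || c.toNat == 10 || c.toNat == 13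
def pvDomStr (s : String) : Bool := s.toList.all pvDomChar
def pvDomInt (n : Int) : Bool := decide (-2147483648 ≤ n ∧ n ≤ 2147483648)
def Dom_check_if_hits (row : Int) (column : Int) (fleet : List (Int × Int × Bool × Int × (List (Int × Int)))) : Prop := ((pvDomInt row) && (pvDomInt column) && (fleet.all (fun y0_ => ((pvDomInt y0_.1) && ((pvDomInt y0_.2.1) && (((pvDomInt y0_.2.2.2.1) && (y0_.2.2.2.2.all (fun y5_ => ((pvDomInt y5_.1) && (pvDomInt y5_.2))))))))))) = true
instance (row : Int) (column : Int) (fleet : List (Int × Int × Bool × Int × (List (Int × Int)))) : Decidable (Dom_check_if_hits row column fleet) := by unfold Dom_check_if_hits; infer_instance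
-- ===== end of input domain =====

-- B: one closed-form range check per ship (orientation handled by an axis swap) scanned via findSome?, instead of A's per-cell inner loops (objective: faster).
-- ===== PORT A =====
def check_if_hits (row : Int) (column : Int) (fleet : List (Int × Int × Bool × Int × (List (Int × Int)))) : Bool :=
  match fleet with
  | [] => false
  | (r0, c0, horiz, len, cells) :: rest =>
    if (row, column) ∈ cells then false
    else if horiz then
      if (PySem.List.pyRange 0 len 1).any (fun i => row == r0 && column == c0 + i) then true
      else check_if_hits row column rest
    else
      if (PySem.List.pyRange 0 len 1).any (fun i => row == r0 + i && column == c0) then true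
      else check_if_hits row column rest

-- ===== PORT B =====
def ship_verdict (row : Int) (column : Int) (ship : Int × Int × Bool × Int × (List (Int × Int))) : Option Bool :=
  let (r0, c0, horiz, len, hits) := ship
  if (row, column) ∈ hits then some false
  else
    let (fixed, fixed0, moving, moving0) := if horiz then (row, r0, column, c0) else (column, c0, row, r0)
    if fixed == fixed0 && decide (moving0 ≤ moving) && decide (moving < moving0 + len) then some true
    else none

def check_if_hits_alt (row : Int) (column : Int) (fleet : List (Int × Int × Bool × Int × (List (Int × Int)))) : Bool :=
  (fleet.findSome? (ship_verdict row column)).getD false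

-- ===== PRECONDITION & SPEC =====
def Spec_check_if_hits (row : Int) (column : Int) (fleet : List (Int × Int × Bool × Int × (List (Int × Int)))) (out : Bool) : Prop := out = check_if_hits_alt row column fleet
instance (row : Int) (column : Int) (fleet : List (Int × Int × Bool × Int × (List (Int × Int)))) (out : Bool) : Decidable (Spec_check_if_hits row column fleet out) := by unfold Spec_check_if_hits; infer_instance

-- ===== CLAIM =====
def Claim_equal_check_if_hits : Prop := ∀ (row : Int) (column : Int) (fleet : List (Int × Int × Bool × Int × (List (Int × Int)))), Dom_check_if_hits row column fleet → Spec_check_if_hits row column fleet (check_if_hits row column fleet)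

-- ===== LEMMAS AND PROOFS =====
lemma any_range_h (row column r0 c0 n : Int) :
    ((PySem.List.pyRange 0 n 1).any (fun i => row == r0 && column == c0 + i))
      = (row == r0 && decide (c0 ≤ column) && decide (column < c0 + n)) := by
  rw [Bool.eq_iff_iff]
  simp only [List.any_eq_true, PySem.List.mem_pyRange_one, Bool.and_eq_true, beq_iff_eq,
    decide_eq_true_eq]
  constructor
  · rintro ⟨i, ⟨h0, hn⟩, hr, hc⟩; omega
  · rintro ⟨⟨hr, hc1⟩, hc2⟩; exact ⟨column - c0, by omega, hr, by omega⟩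

lemma any_range_v (row column r0 c0 n : Int) :
    ((PySem.List.pyRange 0 n 1).any (fun i => row == r0 + i && column == c0))
      = (column == c0 && decide (r0 ≤ row) && decide (row < r0 + n)) := by
  rw [Bool.eq_iff_iff]
  simp only [List.any_eq_true, PySem.List.mem_pyRange_one, Bool.and_eq_true, beq_iff_eq,
    decide_eq_true_eq]
  constructor
  · rintro ⟨i, ⟨h0, hn⟩, hr, hc⟩; omega
  · rintro ⟨⟨hc, hr1⟩, hr2⟩; exact ⟨row - r0, by omega, by omega, hc⟩

lemma alt_cons (row column r0 c0 : Int) (horiz : Bool) (len : Int) (cells : List (Int × Int))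
    (rest : List (Int × Int × Bool × Int × (List (Int × Int)))) :
    check_if_hits_alt row column ((r0, c0, horiz, len, cells) :: rest)
      = (if (row, column) ∈ cells then false
         else if (if horiz then row == r0 && decide (c0 ≤ column) && decide (column < c0 + len)
                  else column == c0 && decide (r0 ≤ row) && decide (row < r0 + len)) then true
         else check_if_hits_alt row column rest) := by
  unfold check_if_hits_alt
  rw [List.findSome?_cons]
  unfold ship_verdict
  by_cases hm : (row, column) ∈ cells
  · simp [hm]
  · cases horiz <;> simp only [hm, if_false, if_true, Bool.false_eq_true] <;>
      split <;> simp_all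

lemma check_if_hits_eq_alt (row column : Int)
    (fleet : List (Int × Int × Bool × Int × (List (Int × Int)))) :
    check_if_hits row column fleet = check_if_hits_alt row column fleet := by
  induction fleet with
  | nil => rfl
  | cons ship rest ih =>
    obtain ⟨r0, c0, horiz, len, cells⟩ := ship
    rw [alt_cons]
    cases horiz with
    | true => simp only [check_if_hits, any_range_h, ih, if_true]
    | false => simp only [check_if_hits, any_range_v, ih, Bool.false_eq_true, if_false]

-- ===== VERDICT =====
theorem check_if_hits_spec : Claim_equal_check_if_hits := by
  intro row column fleet _
  unfold Spec_check_if_hits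
  exact check_if_hits_eq_alt row column fleet
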